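-- pv_equiv track=rewrite | github.com/Kerim405775/HangmanNP | main.py | letter_clicked
-- ===== SOURCE A (Python) =====
-- def letter_clicked(mouse_x, mouse_y):
--     start_x = 50
--     start_y = 400
--     gap = 40
--     for i in range(26):
--         x = start_x + gap * (i % 13)
--         y = start_y + gap * (i // 13)
--         if x - 20 < mouse_x < x + 20 and y - 20 < mouse_y < y + 20:
--             return chr(65 + i)
--     return None
-- ===== SOURCE B (Python) =====
-- def letter_clicked(mouse_x, mouse_y):
--     # direct grid-index computation instead of scanning all 26 keys
--     col = (mouse_x - 30) // 40
--     row = (mouse_y - 380) // 40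
--     if 0 <= col < 13 and 0 <= row < 2:
--         x = 50 + 40 * col
--         y = 400 + 40 * row
--         if abs(mouse_x - x) < 20 and abs(mouse_y - y) < 20:
--             return chr(65 + 13 * row + col)
--     return None
-- ===== Notes on version B (the rewrite author's own statement) =====
-- stated objective: simpler
-- what changed: Replaced A's linear scan over all 26 keys with a direct arithmetic computation of the candidate grid cell via floor division, followed by the same strict ±20 hit re-check.
import Mathlib
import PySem

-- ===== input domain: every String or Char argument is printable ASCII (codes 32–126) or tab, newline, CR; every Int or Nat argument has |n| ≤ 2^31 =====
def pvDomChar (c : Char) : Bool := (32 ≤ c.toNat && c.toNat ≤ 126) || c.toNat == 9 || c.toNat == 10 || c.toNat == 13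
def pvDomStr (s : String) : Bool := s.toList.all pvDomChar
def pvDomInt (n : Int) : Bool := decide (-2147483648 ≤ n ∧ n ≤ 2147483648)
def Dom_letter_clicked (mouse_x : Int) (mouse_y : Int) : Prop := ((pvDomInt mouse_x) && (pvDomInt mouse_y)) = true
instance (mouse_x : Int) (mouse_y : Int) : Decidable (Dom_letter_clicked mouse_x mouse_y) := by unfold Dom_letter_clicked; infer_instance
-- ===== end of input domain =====

-- B replaces A's 26-step scan over all keyboard keys by a direct arithmetic grid-index
-- computation (floor division), re-checking the same strict ±20 hit bounds (objective: simpler).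


-- ===== PORT A =====
-- the 'for i in range(26)' loop with early return, as structural recursion over the range list
def lcLoopA (mouse_x : Int) (mouse_y : Int) : List Int → Option String
  | [] => none
  | i :: rest =>
    let x : Int := 50 + 40 * (PySem.Int.mod i 13)
    let y : Int := 400 + 40 * (PySem.Int.floordiv i 13)
    if x - 20 < mouse_x ∧ mouse_x < x + 20 ∧ y - 20 < mouse_y ∧ mouse_y < y + 20 then
      some (String.ofList [Char.ofNat (65 + i).toNat])
    else lcLoopA mouse_x mouse_y rest

def letter_clicked (mouse_x : Int) (mouse_y : Int) : Option String :=
  lcLoopA mouse_x mouse_y (PySem.List.pyRange 0 26 1)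

-- ===== PORT B =====
def letter_clicked_alt (mouse_x : Int) (mouse_y : Int) : Option String :=
  let col : Int := PySem.Int.floordiv (mouse_x - 30) 40
  let row : Int := PySem.Int.floordiv (mouse_y - 380) 40
  if 0 ≤ col ∧ col < 13 ∧ 0 ≤ row ∧ row < 2 then
    let x : Int := 50 + 40 * col
    let y : Int := 400 + 40 * row
    if |mouse_x - x| < 20 ∧ |mouse_y - y| < 20 then
      some (String.ofList [Char.ofNat (65 + 13 * row + col).toNat])
    else none
  else none

-- ===== PRECONDITION & SPEC =====
def Spec_letter_clicked (mouse_x : Int) (mouse_y : Int) (out : Option String) : Prop := out = letter_clicked_alt mouse_x mouse_y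
instance (mouse_x : Int) (mouse_y : Int) (out : Option String) : Decidable (Spec_letter_clicked mouse_x mouse_y out) := by unfold Spec_letter_clicked; infer_instance

-- ===== CLAIM (what is proved, stated in full; the proofs are below) =====
def Claim_equal_letter_clicked : Prop := ∀ (mouse_x : Int) (mouse_y : Int), Dom_letter_clicked mouse_x mouse_y → Spec_letter_clicked mouse_x mouse_y (letter_clicked mouse_x mouse_y)

-- ===== LEMMAS AND PROOFS =====

-- A's per-key hit test, written with Lean's % and / (equal to PySem's for the positive divisor 13)
def hitC (mx my i : Int) : Prop :=
  50 + 40 * (i % 13) - 20 < mx ∧ mx < 50 + 40 * (i % 13) + 20 ∧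
  400 + 40 * (i / 13) - 20 < my ∧ my < 400 + 40 * (i / 13) + 20

theorem lcLoopA_cons_pos (mx my i : Int) (rest : List Int) (h : hitC mx my i) :
    lcLoopA mx my (i :: rest) = some (String.ofList [Char.ofNat (65 + i).toNat]) := by
  simp only [lcLoopA,
    PySem.Int.mod_eq_emod_of_pos (a := i) (b := 13) (by norm_num),
    PySem.Int.floordiv_eq_ediv_of_pos (a := i) (b := 13) (by norm_num)]
  exact if_pos h

theorem lcLoopA_cons_neg (mx my i : Int) (rest : List Int) (h : ¬ hitC mx my i) :
    lcLoopA mx my (i :: rest) = lcLoopA mx my rest := by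
  simp only [lcLoopA,
    PySem.Int.mod_eq_emod_of_pos (a := i) (b := 13) (by norm_num),
    PySem.Int.floordiv_eq_ediv_of_pos (a := i) (b := 13) (by norm_num)]
  exact if_neg h

theorem lcLoopA_none (mx my : Int) (l : List Int) (h : ∀ i ∈ l, ¬ hitC mx my i) :
    lcLoopA mx my l = none := by
  induction l with
  | nil => rfl
  | cons j t ih =>
    rw [lcLoopA_cons_neg mx my j t (h j (by simp)), ih (fun i hi => h i (by simp [hi]))]

theorem lcLoopA_unique (mx my i0 : Int) (l : List Int) (hmem : i0 ∈ l)
    (hhit : hitC mx my i0) (huniq : ∀ j ∈ l, hitC mx my j → j = i0) :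
    lcLoopA mx my l = some (String.ofList [Char.ofNat (65 + i0).toNat]) := by
  induction l with
  | nil => simp at hmem
  | cons j t ih =>
    by_cases hj : hitC mx my j
    · rw [lcLoopA_cons_pos mx my j t hj, huniq j (by simp) hj]
    · rw [lcLoopA_cons_neg mx my j t hj]
      rcases List.mem_cons.mp hmem with rfl | hmem'
      · exact absurd hhit hj
      · exact ih hmem' (fun k hk => huniq k (by simp [hk]))

-- ===== VERDICT (by name: the statement is the Claim_ definition above) =====
theorem letter_clicked_spec : Claim_equal_letter_clicked := by
  intro mx my _
  show letter_clicked mx my = letter_clicked_alt mx my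
  have hcol : PySem.Int.floordiv (mx - 30) 40 = (mx - 30) / 40 :=
    PySem.Int.floordiv_eq_ediv_of_pos (by norm_num)
  have hrow : PySem.Int.floordiv (my - 380) 40 = (my - 380) / 40 :=
    PySem.Int.floordiv_eq_ediv_of_pos (by norm_num)
  simp only [letter_clicked, letter_clicked_alt, hcol, hrow]
  set col := (mx - 30) / 40 with hcoldef
  set row := (my - 380) / 40 with hrowdef
  -- a hit by key j forces B's computed col/row to be j's grid coordinates
  have key : ∀ j : Int, 0 ≤ j → j < 26 → hitC mx my j → col = j % 13 ∧ row = j / 13 := by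
    intro j h0 h26 hj
    obtain ⟨h1, h2, h3, h4⟩ := hj
    omega
  by_cases hb : 0 ≤ col ∧ col < 13 ∧ 0 ≤ row ∧ row < 2
  · by_cases habs : |mx - (50 + 40 * col)| < 20 ∧ |my - (400 + 40 * row)| < 20
    · rw [if_pos hb, if_pos habs]
      have hi0 : hitC mx my (13 * row + col) := by
        have h1 : (13 * row + col) % 13 = col := by omega
        have h2 : (13 * row + col) / 13 = row := by omega
        obtain ⟨hax, hay⟩ := habs
        rw [abs_lt] at hax hay
        rw [hitC, h1, h2]; omega
      have := lcLoopA_unique mx my (13 * row + col) (PySem.List.pyRange 0 26 1)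
        (PySem.List.mem_pyRange_one.mpr (by omega)) hi0
        (fun j hjmem hjhit => by
          have hjb := PySem.List.mem_pyRange_one.mp hjmem
          obtain ⟨hc, hr⟩ := key j hjb.1 hjb.2 hjhit
          omega)
      rw [this, show (65 + (13 * row + col) : Int) = 65 + 13 * row + col from by ring]
    · rw [if_pos hb, if_neg habs]
      apply lcLoopA_none
      intro j hjmem hjhit
      have hjb := PySem.List.mem_pyRange_one.mp hjmem
      obtain ⟨hc, hr⟩ := key j hjb.1 hjb.2 hjhit
      obtain ⟨h1, h2, h3, h4⟩ := hjhit
      simp only [abs_lt, not_and_or, not_lt] at habs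
      omega
  · rw [if_neg hb]
    apply lcLoopA_none
    intro j hjmem hjhit
    have hjb := PySem.List.mem_pyRange_one.mp hjmem
    obtain ⟨hc, hr⟩ := key j hjb.1 hjb.2 hjhit
    have : 0 ≤ j % 13 ∧ j % 13 < 13 ∧ 0 ≤ j / 13 ∧ j / 13 < 2 := by omega
    omega
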